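-- pv_equiv track=rewrite | github.com/healthycarrot/prodapt-capstone | script/pipeline_mongo/publish_candidate_search_collection.py | degree_rank
-- ===== SOURCE A (Python) =====
-- def normalize_text(value: str | None) -> str:
--     return " ".join((value or "").strip().lower().split())
--
-- def degree_rank(degree: str, field_of_study: str) -> int:
--     text = normalize_text(f"{degree} {field_of_study}")
--     if not text:
--         return 0
--
--     if any(token in text for token in ["doctorate", "doctoral", "phd", "dphil", "md", "jd"]):
--         return 5
--     if any(
--         token in text
--         for token in [
--             "master",
--             "m.sc",
--             "msc",
--             "m.s.",
--             "m.s ",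
--             "ms ",
--             "m.a.",
--             "ma ",
--             "mba",
--             "m.eng",
--             "meng",
--         ]
--     ):
--         return 4
--     if any(
--         token in text
--         for token in [
--             "bachelor",
--             "b.sc",
--             "bsc",
--             "b.s.",
--             "b.s ",
--             "bs ",
--             "b.a.",
--             "ba ",
--             "b.eng",
--             "beng",
--             "undergraduate",
--         ]
--     ):
--         return 3
--     if any(token in text for token in ["associate", "diploma", "certificate", "certification"]):
--         return 2
--     if any(token in text for token in ["high school", "secondary", "secondary school"]):
--         return 1
--     return 0
-- ===== SOURCE B (Python) =====
-- def normalize_text(value):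
--     return " ".join((value or "").strip().lower().split())
--
-- _TABLE = [
--     ("doctorate", 5), ("doctoral", 5), ("phd", 5), ("dphil", 5), ("md", 5), ("jd", 5),
--     ("master", 4), ("m.sc", 4), ("msc", 4), ("m.s.", 4), ("m.s ", 4), ("ms ", 4),
--     ("m.a.", 4), ("ma ", 4), ("mba", 4), ("m.eng", 4), ("meng", 4),
--     ("bachelor", 3), ("b.sc", 3), ("bsc", 3), ("b.s.", 3), ("b.s ", 3), ("bs ", 3),
--     ("b.a.", 3), ("ba ", 3), ("b.eng", 3), ("beng", 3), ("undergraduate", 3),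
--     ("associate", 2), ("diploma", 2), ("certificate", 2), ("certification", 2),
--     ("high school", 1), ("secondary", 1), ("secondary school", 1),
-- ]
--
-- def degree_rank(degree, field_of_study):
--     # Single left-to-right scan over the text: at each starting position check
--     # which table tokens begin there and keep the maximal rank seen anywhere.
--     text = normalize_text(f"{degree} {field_of_study}")
--     best = 0
--     for i in range(len(text)):
--         for token, rank in _TABLE:
--             if text.startswith(token, i):
--                 best = max(best, rank)
--     return best
-- ===== Notes on version B (the rewrite author's own statement) =====
-- stated objective: alternative
-- what changed: Instead of five short-circuiting any(token in text) substring-search cascades, B scans the normalized text position by position, checking at each starting index which tokens of one flat token-to-rank table begin there, and returns the maximal rank matched anywhere; correct because a token occurs as a substring iff it starts at some position and the rank values coincide with the cascade's priority order.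
import Mathlib
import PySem

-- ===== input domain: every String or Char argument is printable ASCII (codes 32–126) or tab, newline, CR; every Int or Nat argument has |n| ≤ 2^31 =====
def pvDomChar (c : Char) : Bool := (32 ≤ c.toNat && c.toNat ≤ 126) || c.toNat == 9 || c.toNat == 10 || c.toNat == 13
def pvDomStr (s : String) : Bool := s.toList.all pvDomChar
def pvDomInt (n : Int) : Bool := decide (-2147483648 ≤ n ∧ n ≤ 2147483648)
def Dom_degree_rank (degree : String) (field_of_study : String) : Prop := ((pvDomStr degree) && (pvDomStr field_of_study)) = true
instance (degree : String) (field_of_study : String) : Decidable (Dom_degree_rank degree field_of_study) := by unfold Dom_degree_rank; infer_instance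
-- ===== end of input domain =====

-- B replaces A's five any(token in text) substring-search cascades by a single
-- position-by-position scan of the normalized text against one flat token→rank table,
-- keeping the maximal rank matched at any starting position (objective: alternative).

-- ===== PORT A =====
-- normalize_text: " ".join((value or "").strip().lower().split())
def pvNormalize (value : String) : String :=
  PySem.Str.join " " (PySem.Str.split₀ (PySem.Str.lower (PySem.Str.strip value)))

def pvTier5 : List String := ["doctorate", "doctoral", "phd", "dphil", "md", "jd"]
def pvTier4 : List String :=
  ["master", "m.sc", "msc", "m.s.", "m.s ", "ms ", "m.a.", "ma ", "mba", "m.eng", "meng"]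
def pvTier3 : List String :=
  ["bachelor", "b.sc", "bsc", "b.s.", "b.s ", "bs ", "b.a.", "ba ", "b.eng", "beng", "undergraduate"]
def pvTier2 : List String := ["associate", "diploma", "certificate", "certification"]
def pvTier1 : List String := ["high school", "secondary", "secondary school"]

def degree_rank (degree : String) (field_of_study : String) : Int :=
  let text := pvNormalize (degree ++ " " ++ field_of_study)
  if PySem.Str.len text == 0 then 0
  else if pvTier5.any (fun token => PySem.Str.isIn token text) then 5
  else if pvTier4.any (fun token => PySem.Str.isIn token text) then 4
  else if pvTier3.any (fun token => PySem.Str.isIn token text) then 3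
  else if pvTier2.any (fun token => PySem.Str.isIn token text) then 2
  else if pvTier1.any (fun token => PySem.Str.isIn token text) then 1
  else 0

-- ===== PORT B =====
def pvTable : List (String × Int) :=
  [("doctorate", 5), ("doctoral", 5), ("phd", 5), ("dphil", 5), ("md", 5), ("jd", 5),
   ("master", 4), ("m.sc", 4), ("msc", 4), ("m.s.", 4), ("m.s ", 4), ("ms ", 4),
   ("m.a.", 4), ("ma ", 4), ("mba", 4), ("m.eng", 4), ("meng", 4),
   ("bachelor", 3), ("b.sc", 3), ("bsc", 3), ("b.s.", 3), ("b.s ", 3), ("bs ", 3),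
   ("b.a.", 3), ("ba ", 3), ("b.eng", 3), ("beng", 3), ("undergraduate", 3),
   ("associate", 2), ("diploma", 2), ("certificate", 2), ("certification", 2),
   ("high school", 1), ("secondary", 1), ("secondary school", 1)]

-- text.startswith(token, i): hand port (PySem has no start argument); exact for 0 ≤ i,
-- and every i produced by range(len(text)) is nonnegative.
def pvStartsFrom (text : String) (token : String) (i : Int) : Bool :=
  PySem.Chars.startswith (text.toList.drop i.toNat) token.toList

def degree_rank_alt (degree : String) (field_of_study : String) : Int :=
  let text := pvNormalize (degree ++ " " ++ field_of_study)
  (PySem.List.pyRange 0 (PySem.Str.len text) 1).foldl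
    (fun best i =>
      pvTable.foldl
        (fun best p =>
          if pvStartsFrom text p.1 i
          then max best p.2 else best) best) 0

-- ===== PRECONDITION & SPEC =====
def Spec_degree_rank (degree : String) (field_of_study : String) (out : Int) : Prop := out = degree_rank_alt degree field_of_study
instance (degree : String) (field_of_study : String) (out : Int) : Decidable (Spec_degree_rank degree field_of_study out) := by unfold Spec_degree_rank; infer_instance

-- ===== CLAIM (what is proved, stated in full; the proofs are below) =====
def Claim_equal_degree_rank : Prop := ∀ (degree : String) (field_of_study : String), Dom_degree_rank degree field_of_study → Spec_degree_rank degree field_of_study (degree_rank degree field_of_study)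

-- ===== LEMMAS AND PROOFS =====

-- generic facts about Int-valued folds whose step never decreases the accumulator
theorem pvFoldl_ge {α : Type} (upd : Int → α → Int) (h : ∀ b x, b ≤ upd b x) :
    ∀ (L : List α) (b : Int), b ≤ L.foldl upd b := by
  intro L
  induction L with
  | nil => intro b; simp
  | cons x xs ih => intro b; exact le_trans (h b x) (ih (upd b x))

theorem pvFoldl_le_inv {α : Type} (upd : Int → α → Int) (M : Int)
    (L : List α) (hstep : ∀ x ∈ L, ∀ b, b ≤ M → upd b x ≤ M) :
    ∀ b, b ≤ M → L.foldl upd b ≤ M := by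
  induction L with
  | nil => intro b hb; simpa using hb
  | cons x xs ih =>
    intro b hb
    exact ih (fun y hy => hstep y (List.mem_cons_of_mem x hy)) (upd b x)
      (hstep x (List.mem_cons_self) b hb)

theorem pvLe_foldl_of_mem {α : Type} (upd : Int → α → Int)
    (h : ∀ b x, b ≤ upd b x) (v : Int) (i : α) :
    ∀ (L : List α), i ∈ L → (∀ b, v ≤ upd b i) → ∀ b, v ≤ L.foldl upd b := by
  intro L
  induction L with
  | nil => intro hm; exact absurd hm (List.not_mem_nil)
  | cons x xs ih =>
    intro hm hv b
    rcases List.mem_cons.mp hm with rfl | hm'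
    · exact le_trans (hv b) (pvFoldl_ge upd h xs (upd b i))
    · exact ih hm' hv (upd b x)

-- the inner step (conditional max with a rank) never decreases the accumulator
theorem pvInner_step_ge (q : String × Int → Bool) (b : Int) (p : String × Int) :
    b ≤ (if q p then max b p.2 else b) := by
  split <;> simp

-- the inner fold over any table never decreases the accumulator
theorem pvInner_ge (q : String × Int → Bool) (L : List (String × Int)) (b : Int) :
    b ≤ L.foldl (fun b p => if q p then max b p.2 else b) b :=
  pvFoldl_ge _ (pvInner_step_ge q) L b

-- a matched table entry's rank is a lower bound of the inner fold
theorem pvRank_le_inner (q : String × Int → Bool) (L : List (String × Int))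
    (p : String × Int) (hp : p ∈ L) (hq : q p = true) (b : Int) :
    p.2 ≤ L.foldl (fun b p => if q p then max b p.2 else b) b := by
  refine pvLe_foldl_of_mem _ (pvInner_step_ge q) p.2 p L hp (fun b => ?_) b
  rw [hq]; simp

-- the inner fold is bounded by M when every matched rank is
theorem pvInner_le (q : String × Int → Bool) (L : List (String × Int)) (M : Int)
    (hM : ∀ p ∈ L, q p = true → p.2 ≤ M) (b : Int) (hb : b ≤ M) :
    L.foldl (fun b p => if q p then max b p.2 else b) b ≤ M := by
  refine pvFoldl_le_inv _ M L (fun p hp b hb => ?_) b hb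
  by_cases hq : q p = true
  · rw [hq]; simp only [if_pos]; exact max_le hb (hM p hp hq)
  · rw [Bool.not_eq_true] at hq; rw [hq]; simpa using hb

-- folding B's update over one tier tagged with a constant rank r
theorem pvFold_tier (c : String → Bool) (r : Int) (ts : List String) (b : Int) :
    (ts.map (fun t => (t, r))).foldl
        (fun b p => if c p.1 then max b p.2 else b) b
      = if ts.any c then max b r else b := by
  induction ts generalizing b with
  | nil => simp
  | cons t ts ih =>
    rw [List.map_cons, List.foldl_cons, List.any_cons]
    by_cases hc : c t = true
    · rw [if_pos hc, ih, hc]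
      by_cases ha : ts.any c = true <;> simp [ha]
    · rw [Bool.not_eq_true] at hc
      rw [hc, if_neg (by simp), ih]
      simp

-- the flat table is the five tiers, each tagged with its rank
theorem pvTable_eq :
    pvTable = pvTier5.map (fun t => (t, (5 : Int))) ++ pvTier4.map (fun t => (t, (4 : Int)))
      ++ pvTier3.map (fun t => (t, (3 : Int))) ++ pvTier2.map (fun t => (t, (2 : Int)))
      ++ pvTier1.map (fun t => (t, (1 : Int))) := rfl

-- A's cascade equals the flat max-fold over the table with the isIn condition
theorem pvCascade_eq_flat (c : String → Bool) :
    (if pvTier5.any c then (5 : Int)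
     else if pvTier4.any c then 4
     else if pvTier3.any c then 3
     else if pvTier2.any c then 2
     else if pvTier1.any c then 1
     else 0)
      = pvTable.foldl (fun b p => if c p.1 then max b p.2 else b) 0 := by
  rw [pvTable_eq]
  rw [List.foldl_append, List.foldl_append, List.foldl_append, List.foldl_append]
  rw [pvFold_tier, pvFold_tier, pvFold_tier, pvFold_tier, pvFold_tier]
  generalize pvTier5.any c = a5
  generalize pvTier4.any c = a4
  generalize pvTier3.any c = a3
  generalize pvTier2.any c = a2
  generalize pvTier1.any c = a1
  cases a5 <;> cases a4 <;> cases a3 <;> cases a2 <;> cases a1 <;> decide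

-- every token of the table is nonempty
theorem pvTable_tokens_ne_nil : ∀ p ∈ pvTable, p.1.toList ≠ [] := by decide

-- B's per-position condition, expressed as a prefix of the dropped character list
theorem pvStarts_iff (text : String) (j : Nat) (tok : String) :
    pvStartsFrom text tok (j : Int) = true ↔ tok.toList <+: text.toList.drop j := by
  rw [pvStartsFrom, Int.toNat_natCast, PySem.Chars.startswith_iff]

-- the core identity: the position scan equals the flat isIn fold
theorem pvScan_eq_flat (text : String) :
    (PySem.List.pyRange 0 (PySem.Str.len text) 1).foldl
      (fun best i =>
        pvTable.foldl
          (fun best p =>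
            if pvStartsFrom text p.1 i
            then max best p.2 else best) best) 0
    = pvTable.foldl
        (fun b p => if PySem.Str.isIn p.1 text then max b p.2 else b) 0 := by
  set n : Int := PySem.Str.len text with hn
  set F : Int := pvTable.foldl
      (fun b p => if PySem.Str.isIn p.1 text then max b p.2 else b) 0 with hF
  have houter_ge : ∀ b i, b ≤ pvTable.foldl
      (fun best p =>
        if pvStartsFrom text p.1 i
        then max best p.2 else best) b :=
    fun b i => pvInner_ge _ pvTable b
  apply le_antisymm
  · -- scan ≤ flat: every token matched at a position is a substring
    refine pvFoldl_le_inv _ F _ (fun i hi b hb => ?_) 0 (pvInner_ge _ pvTable 0)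
    refine pvInner_le _ pvTable F (fun p hp hq => ?_) b hb
    -- startswith at position i implies isIn
    rcases PySem.List.mem_pyRange_one.mp hi with ⟨hi0, _⟩
    obtain ⟨j, rfl⟩ := Int.eq_ofNat_of_zero_le hi0
    have hpref : p.1.toList <+: text.toList.drop j := (pvStarts_iff text j p.1).mp hq
    have hisin : PySem.Str.isIn p.1 text = true := by
      rw [PySem.Str.isIn_eq]
      exact (PySem.Chars.exists_prefix_drop_iff_isIn _ _).mp ⟨j, hpref⟩
    exact pvRank_le_inner _ pvTable p hp (by simpa using hisin) 0
  · -- flat ≤ scan: every substring token starts at some in-range position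
    refine pvInner_le _ pvTable _ (fun p hp hq => ?_) 0 (pvFoldl_ge _ houter_ge _ 0)
    have hinf : p.1.toList <:+: text.toList := by
      rw [PySem.Str.isIn_eq] at hq
      exact (PySem.Chars.isIn_iff_infix _ _).mp hq
    obtain ⟨j, hpref⟩ := (PySem.Chars.exists_prefix_drop_iff_isIn _ _).mpr
      (by rw [← PySem.Chars.isIn_iff_infix] at hinf; exact hinf)
    have hne : p.1.toList ≠ [] := pvTable_tokens_ne_nil p hp
    have hjlt : j < text.toList.length := by
      by_contra hge
      rw [not_lt] at hge
      rw [List.drop_eq_nil_of_le hge] at hpref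
      exact hne (List.prefix_nil.mp hpref)
    have hmem : (j : Int) ∈ PySem.List.pyRange 0 n 1 := by
      rw [PySem.List.mem_pyRange_one]
      constructor
      · exact Int.natCast_nonneg j
      · rw [hn, PySem.Str.len_eq]
        exact_mod_cast hjlt
    refine pvLe_foldl_of_mem _ houter_ge p.2 (j : Int) _ hmem (fun b => ?_) 0
    exact pvRank_le_inner _ pvTable p hp (by
      rw [pvStarts_iff text j p.1]; exact hpref) b

-- ===== VERDICT (by name: the statement is the Claim_ definition above) =====
theorem degree_rank_spec : Claim_equal_degree_rank := by
  intro degree field_of_study _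
  unfold Spec_degree_rank degree_rank degree_rank_alt
  generalize pvNormalize (degree ++ " " ++ field_of_study) = text
  rw [pvScan_eq_flat text]
  by_cases h0 : (PySem.Str.len text == 0) = true
  · rw [if_pos h0]
    have hlen : text.toList = [] := by
      have h0' : PySem.Str.len text = 0 := beq_iff_eq.mp h0
      rw [PySem.Str.len_eq] at h0'
      have h1 : text.length = 0 := by exact_mod_cast h0'
      exact List.length_eq_zero_iff.mp (by simpa using h1)
    have hno : ∀ p ∈ pvTable, PySem.Str.isIn p.1 text = false := by
      intro p hp
      rw [PySem.Str.isIn_eq, PySem.Chars.isIn_eq_false_iff, hlen]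
      intro hinf
      exact pvTable_tokens_ne_nil p hp (List.eq_nil_of_infix_nil hinf)
    refine le_antisymm (pvInner_ge _ pvTable 0)
      (pvInner_le _ pvTable 0 (fun p hp hq => ?_) 0 le_rfl)
    rw [hno p hp] at hq
    exact absurd hq (by simp)
  · rw [if_neg h0]
    exact pvCascade_eq_flat (fun token => PySem.Str.isIn token text)
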